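-- pv_equiv track=rewrite | github.com/nakanoh8/work | 210115/benkyoukai/quiz/kaibunsu_ng.py | toHachishinsu
-- ===== SOURCE A (Python) =====
-- def toHachishinsu(jusshinsu):
--     hachishinsu = 0
--     hachishinsuCounter = -1
--     i = -1
--     while hachishinsuCounter < jusshinsu:
--         i += 1
--         if isHachishinsu(i):
--             hachishinsuCounter += 1
--             hachishinsu = i
--     return hachishinsu
--
-- def isHachishinsu(num):
--     for aChar in list(str(num)):
--         if int(aChar) >= 8:
--             return False
--     return True
-- ===== SOURCE B (Python) =====
-- def toHachishinsu(jusshinsu):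
--     # The k-th (0-indexed) nonnegative integer whose decimal digits are all < 8
--     # is the octal representation of k read as a decimal number.
--     return int(oct(jusshinsu)[2:])
-- ===== Notes on version B (the rewrite author's own statement) =====
-- stated objective: faster
-- what changed: Instead of scanning every integer and counting those whose digits are all below 8, B computes the answer in closed form by reading the octal representation of jusshinsu as a decimal number.
-- outside the precondition, e.g. on toHachishinsu(-1): A returns 0, B raises ValueError; on toHachishinsu(-5): A returns 0, B raises ValueError
import Mathlib
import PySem

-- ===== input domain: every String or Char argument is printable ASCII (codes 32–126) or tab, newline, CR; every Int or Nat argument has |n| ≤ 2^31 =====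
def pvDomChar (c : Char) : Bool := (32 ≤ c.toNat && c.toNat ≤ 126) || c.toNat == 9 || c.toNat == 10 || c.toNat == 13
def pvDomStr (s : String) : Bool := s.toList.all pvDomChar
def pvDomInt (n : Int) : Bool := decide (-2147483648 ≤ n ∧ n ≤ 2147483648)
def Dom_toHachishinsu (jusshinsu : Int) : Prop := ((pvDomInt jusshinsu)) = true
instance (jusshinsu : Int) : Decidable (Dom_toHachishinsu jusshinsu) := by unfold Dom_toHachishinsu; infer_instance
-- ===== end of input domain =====

-- B replaces A's scan-and-count over all integers with digits < 8 by the closed form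
-- "read the octal representation of jusshinsu as a decimal number" (a faster algorithm).

-- ===== PORT A =====
-- isHachishinsu(num): every decimal digit of num is < 8.  int(aChar) is PySem.Int.ofChars?
-- on one character; A only ever calls this on nonnegative num, whose characters are single
-- digits, so ofChars? is always `some` and the getD default never fires.
def isHachishinsu (num : Int) : Bool :=
  (PySem.Int.toChars num).all (fun aChar =>
    decide ((PySem.Int.ofChars? [aChar]).getD 0 < 8))

-- the while loop of A; fuel is only a termination guard, proved sufficient below
-- (the loop exits via the counter after visiting i = octToDec jusshinsu ≤ jusshinsu² + 1 numbers).
def toHachishinsuLoop : Nat → Int → Int → Int → Int → Int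
  | 0, _, _, _, hachishinsu => hachishinsu
  | fuel+1, jusshinsu, hachishinsuCounter, i, hachishinsu =>
    if hachishinsuCounter < jusshinsu then
      let i' := i + 1
      if isHachishinsu i' then toHachishinsuLoop fuel jusshinsu (hachishinsuCounter + 1) i' i'
      else toHachishinsuLoop fuel jusshinsu hachishinsuCounter i' hachishinsu
    else hachishinsu

def toHachishinsu (jusshinsu : Int) : Int :=
  toHachishinsuLoop ((jusshinsu.toNat + 1) * (jusshinsu.toNat + 1) + 2) jusshinsu (-1) (-1) 0

-- ===== PORT B =====
-- int(oct(n)[2:]): the octal digits of n read as a decimal number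
def octToDec (n : Nat) : Nat :=
  if n = 0 then 0 else octToDec (n / 8) * 10 + n % 8
decreasing_by exact Nat.div_lt_self (by omega) (by omega)

def toHachishinsu_alt (jusshinsu : Int) : Int :=
  (octToDec jusshinsu.toNat : Int)

-- ===== PRECONDITION & SPEC =====
-- Pre_ excludes negative inputs: there A's counter starts below any negative target and A
-- degenerately returns 0 without counting anything, while B's oct-string parse raises ValueError.
def Pre_toHachishinsu (jusshinsu : Int) : Prop := 0 ≤ jusshinsu
instance (jusshinsu : Int) : Decidable (Pre_toHachishinsu jusshinsu) := by
  unfold Pre_toHachishinsu; infer_instance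

def pvWitness_toHachishinsu : Int := 9

def Spec_toHachishinsu (jusshinsu : Int) (out : Int) : Prop := out = toHachishinsu_alt jusshinsu
instance (jusshinsu : Int) (out : Int) : Decidable (Spec_toHachishinsu jusshinsu out) := by
  unfold Spec_toHachishinsu; infer_instance

-- ===== CLAIM (what is proved, stated in full; the proofs are below) =====
def Claim_equal_toHachishinsu : Prop := ∀ (jusshinsu : Int), Dom_toHachishinsu jusshinsu → Pre_toHachishinsu jusshinsu → Spec_toHachishinsu jusshinsu (toHachishinsu jusshinsu)

-- ===== LEMMAS AND PROOFS =====

-- the decimal-digit predicate of isHachishinsu, arithmetically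
def digitsLt8 (n : Nat) : Bool :=
  decide (n % 10 < 8) && (if n / 10 = 0 then true else digitsLt8 (n / 10))
decreasing_by exact Nat.div_lt_self (by omega) (by omega)

-- inverse of octToDec on numbers whose decimal digits are all < 8
def decToOct (m : Nat) : Nat :=
  if m = 0 then 0 else decToOct (m / 10) * 8 + m % 10
decreasing_by exact Nat.div_lt_self (by omega) (by omega)

lemma octToDec_zero : octToDec 0 = 0 := by rw [octToDec]; simp
lemma octToDec_eq (n : Nat) (h : n ≠ 0) : octToDec n = octToDec (n / 8) * 10 + n % 8 := by
  conv_lhs => rw [octToDec]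
  simp [h]
lemma decToOct_zero : decToOct 0 = 0 := by rw [decToOct]; simp
lemma decToOct_eq (m : Nat) (h : m ≠ 0) : decToOct m = decToOct (m / 10) * 8 + m % 10 := by
  conv_lhs => rw [decToOct]
  simp [h]
lemma digitsLt8_eq (n : Nat) :
    digitsLt8 n = (decide (n % 10 < 8) && (if n / 10 = 0 then true else digitsLt8 (n / 10))) := by
  conv_lhs => rw [digitsLt8]

lemma octToDec_pos (n : Nat) (h : 0 < n) : 0 < octToDec n := by
  induction n using Nat.strong_induction_on with
  | _ n ih =>
    rw [octToDec_eq n (by omega)]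
    by_cases hr : n % 8 = 0
    · have hq : 0 < n / 8 := by omega
      have := ih (n / 8) (Nat.div_lt_self h (by omega)) hq
      omega
    · omega

lemma octToDec_lt (a b : Nat) (h : a < b) : octToDec a < octToDec b := by
  induction a using Nat.strong_induction_on generalizing b with
  | _ a ih =>
    by_cases ha : a = 0
    · subst ha; rw [octToDec_zero]; exact octToDec_pos b h
    · rw [octToDec_eq a ha, octToDec_eq b (by omega)]
      have hq : a / 8 ≤ b / 8 := Nat.div_le_div_right (le_of_lt h)
      have ha8 : a % 8 < 8 := Nat.mod_lt _ (by omega)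
      have hb8 : b % 8 < 8 := Nat.mod_lt _ (by omega)
      rcases Nat.lt_or_ge (a / 8) (b / 8) with hqlt | hqge
      · have := ih (a / 8) (Nat.div_lt_self (by omega) (by omega)) (b / 8) hqlt
        omega
      · have hqe : a / 8 = b / 8 := le_antisymm hq hqge
        rw [hqe]
        omega

lemma octToDec_le (a b : Nat) (h : a ≤ b) : octToDec a ≤ octToDec b := by
  rcases Nat.lt_or_ge a b with hlt | hge
  · exact Nat.le_of_lt (octToDec_lt a b hlt)
  · have : a = b := le_antisymm h hge
    simp [this]

lemma digitsLt8_octToDec (n : Nat) : digitsLt8 (octToDec n) = true := by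
  induction n using Nat.strong_induction_on with
  | _ n ih =>
    by_cases hn : n = 0
    · subst hn; rw [octToDec_zero, digitsLt8_eq]; simp
    · rw [octToDec_eq n hn, digitsLt8_eq]
      have h8 : n % 8 < 8 := Nat.mod_lt _ (by omega)
      have hm : (octToDec (n / 8) * 10 + n % 8) % 10 = n % 8 := by omega
      have hd : (octToDec (n / 8) * 10 + n % 8) / 10 = octToDec (n / 8) := by omega
      rw [hm, hd]
      by_cases hz : octToDec (n / 8) = 0
      · simp [hz, h8]
      · simp only [hz, if_false]
        have := ih (n / 8) (Nat.div_lt_self (by omega) (by omega))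
        simp [this, h8]

lemma decToOct_pos (m : Nat) (h : 0 < m) : 0 < decToOct m := by
  induction m using Nat.strong_induction_on with
  | _ m ih =>
    rw [decToOct_eq m (by omega)]
    by_cases hr : m % 10 = 0
    · have hq : 0 < m / 10 := by omega
      have := ih (m / 10) (Nat.div_lt_self h (by omega)) hq
      omega
    · omega

lemma octToDec_decToOct (m : Nat) (h : digitsLt8 m = true) : octToDec (decToOct m) = m := by
  induction m using Nat.strong_induction_on with
  | _ m ih =>
    by_cases hm : m = 0
    · subst hm; rw [decToOct_zero, octToDec_zero]
    · rw [digitsLt8_eq] at h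
      simp only [Bool.and_eq_true, decide_eq_true_eq] at h
      obtain ⟨hr, hrest⟩ := h
      rw [decToOct_eq m hm]
      by_cases hq : m / 10 = 0
      · rw [hq, decToOct_zero]
        rw [octToDec_eq (0 * 8 + m % 10) (by omega)]
        have h1 : (0 * 8 + m % 10) / 8 = 0 := by omega
        have h2 : (0 * 8 + m % 10) % 8 = m % 10 := by omega
        rw [h1, h2, octToDec_zero]
        omega
      · simp only [hq, if_false] at hrest
        have ihq := ih (m / 10) (Nat.div_lt_self (by omega) (by omega)) hrest
        have hpos : 0 < decToOct (m / 10) := decToOct_pos _ (by omega)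
        rw [octToDec_eq _ (by omega)]
        have hdiv : (decToOct (m / 10) * 8 + m % 10) / 8 = decToOct (m / 10) := by omega
        have hmod : (decToOct (m / 10) * 8 + m % 10) % 8 = m % 10 := by omega
        rw [hdiv, hmod, ihq]
        omega

lemma digitsLt8_between (n m : Nat) (hl : octToDec n < m) (hr : m < octToDec (n + 1)) :
    digitsLt8 m = false := by
  by_contra hc
  have h : digitsLt8 m = true := by simpa using hc
  have heq := octToDec_decToOct m h
  have h1 : n < decToOct m := by
    by_contra hle
    rcases Nat.lt_or_ge (decToOct m) n with hlt | hge
    · have := octToDec_lt _ _ hlt; omega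
    · have hx : decToOct m = n := by omega
      rw [hx] at heq; omega
  have h2 : decToOct m < n + 1 := by
    by_contra hge
    rcases Nat.lt_or_ge (n + 1) (decToOct m) with hlt | hge'
    · have := octToDec_lt _ _ hlt; omega
    · have hx : decToOct m = n + 1 := by omega
      rw [hx] at heq; omega
  omega

lemma octToDec_le_sq (n : Nat) : octToDec n ≤ n * n + 1 := by
  induction n using Nat.strong_induction_on with
  | _ n ih =>
    by_cases hn : n = 0
    · subst hn; rw [octToDec_zero]; omega
    · rw [octToDec_eq n hn]
      by_cases hsmall : n < 8
      · have hq0 : n / 8 = 0 := by omega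
        rw [hq0, octToDec_zero]
        have hnn : n ≤ n * n := Nat.le_mul_of_pos_left n (by omega)
        omega
      · have hq1 : 1 ≤ n / 8 := by omega
        have ihq := ih (n / 8) (Nat.div_lt_self (by omega) (by omega))
        have h8q' : 8 * (n / 8) ≤ n := by omega
        have h64 : (8 * (n / 8)) * (8 * (n / 8)) ≤ n * n := Nat.mul_le_mul h8q' h8q'
        have hqq : 1 ≤ (n / 8) * (n / 8) := Nat.one_le_iff_ne_zero.mpr (by positivity)
        have hexp : (8 * (n / 8)) * (8 * (n / 8)) = 64 * ((n / 8) * (n / 8)) := by ring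
        have h8 : n % 8 < 8 := Nat.mod_lt _ (by omega)
        have hb : octToDec (n / 8) * 10 + n % 8 ≤ ((n / 8) * (n / 8) + 1) * 10 + 7 := by
          have := Nat.mul_le_mul_right 10 ihq
          omega
        omega

lemma digitVal (d : Nat) (hd : d < 10) :
    (PySem.Int.ofChars? [Nat.digitChar d]).getD 0 = (d : Int) := by
  interval_cases d <;> decide

lemma toDigitsCore_all (fuel : Nat) : ∀ (n : Nat) (ds : List Char), n < fuel →
    (Nat.toDigitsCore 10 fuel n ds).all
        (fun aChar => decide ((PySem.Int.ofChars? [aChar]).getD 0 < 8))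
      = (digitsLt8 n && ds.all (fun aChar => decide ((PySem.Int.ofChars? [aChar]).getD 0 < 8))) := by
  induction fuel with
  | zero => intro n ds h; omega
  | succ fuel ih =>
    intro n ds h
    rw [Nat.toDigitsCore]
    have hd : (decide ((PySem.Int.ofChars? [Nat.digitChar (n % 10)]).getD 0 < 8))
        = decide (n % 10 < 8) := by
      rw [digitVal (n % 10) (Nat.mod_lt _ (by omega))]
      exact decide_eq_decide.mpr (by exact_mod_cast Iff.rfl)
    by_cases hq : n / 10 = 0
    · simp only [hq, if_true, List.all_cons]
      rw [digitsLt8_eq, hq]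
      simp [hd]
    · simp only [hq, if_false]
      rw [ih (n / 10) _ (by
        have := Nat.div_lt_self (show 0 < n by omega) (show 1 < 10 by omega)
        omega)]
      rw [digitsLt8_eq (n := n)]
      simp only [hq, if_false, List.all_cons]
      simp [hd, Bool.and_assoc, Bool.and_comm]

lemma isHachishinsu_natCast (m : Nat) : isHachishinsu (m : Int) = digitsLt8 m := by
  unfold isHachishinsu
  have hneg : ¬ ((m : Int) < 0) := by exact_mod_cast Int.not_lt.mpr (Int.natCast_nonneg m)
  simp only [PySem.Int.toChars, hneg, if_false, Int.toNat_natCast, Nat.toDigits]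
  rw [toDigitsCore_all (m + 1) m [] (by omega)]
  simp

-- A's loop, started at counter cn with octToDec cn ≤ i < octToDec (cn+1) and
-- hachishinsu = octToDec cn, stops at the jn-th all-digits-below-8 number octToDec jn.
lemma loop_eq (fuel : Nat) : ∀ (jn cn i : Nat), cn ≤ jn → octToDec cn ≤ i →
    i < octToDec (cn + 1) → octToDec jn + 1 ≤ i + fuel →
    toHachishinsuLoop fuel (jn : Int) (cn : Int) (i : Int) ((octToDec cn : Nat) : Int)
      = ((octToDec jn : Nat) : Int) := by
  induction fuel with
  | zero =>
    intro jn cn i hcj hlo hhi hfuel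
    rcases Nat.lt_or_ge cn jn with hlt | hge
    · have h1 : octToDec (cn + 1) ≤ octToDec jn := octToDec_le _ _ (by omega)
      omega
    · have : cn = jn := by omega
      subst this
      rfl
  | succ fuel ih =>
    intro jn cn i hcj hlo hhi hfuel
    rw [toHachishinsuLoop]
    rcases Nat.lt_or_ge cn jn with hlt | hge
    · have hc : ((cn : Int) < (jn : Int)) := by exact_mod_cast hlt
      simp only [hc, if_true]
      have hcast : (i : Int) + 1 = ((i + 1 : Nat) : Int) := by push_cast; ring
      rw [hcast]
      by_cases hacc : i + 1 = octToDec (cn + 1)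
      · have htrue : isHachishinsu ((i + 1 : Nat) : Int) = true := by
          rw [isHachishinsu_natCast, hacc]; exact digitsLt8_octToDec (cn + 1)
        rw [htrue]
        simp only [if_true]
        have h2 : ((cn : Int) + 1) = ((cn + 1 : Nat) : Int) := by push_cast; ring
        rw [h2, hacc]
        exact ih jn (cn + 1) (octToDec (cn + 1)) (by omega) (by omega)
          (octToDec_lt _ _ (by omega)) (by omega)
      · have hfalse : isHachishinsu ((i + 1 : Nat) : Int) = false := by
          rw [isHachishinsu_natCast]
          exact digitsLt8_between cn (i + 1) (by omega) (by omega)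
        rw [hfalse]
        simp only [Bool.false_eq_true, if_false]
        exact ih jn cn (i + 1) hcj (by omega) (by omega) (by omega)
    · have hc : ¬ ((cn : Int) < (jn : Int)) := by exact_mod_cast Nat.not_lt.mpr hge
      simp only [hc, if_false]
      have : cn = jn := by omega
      rw [this]

-- ===== VERDICT (by name: the statement is the Claim_ definition above) =====
theorem toHachishinsu_spec : Claim_equal_toHachishinsu := by
  intro j _ hpre
  unfold Spec_toHachishinsu toHachishinsu toHachishinsu_alt
  set jn := j.toNat with hjn
  have hj : (jn : Int) = j := Int.toNat_of_nonneg hpre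
  rw [← hj]
  have hstep : (jn + 1) * (jn + 1) + 2 = ((jn + 1) * (jn + 1) + 1) + 1 := rfl
  rw [hstep, toHachishinsuLoop]
  have hc : ((-1 : Int) < (jn : Int)) := by
    have := Int.natCast_nonneg jn; omega
  simp only [hc, if_true]
  have h0 : (-1 : Int) + 1 = ((0 : Nat) : Int) := by norm_num
  rw [h0]
  have htrue : isHachishinsu ((0 : Nat) : Int) = true := by
    rw [isHachishinsu_natCast, digitsLt8_eq]; simp
  rw [htrue]
  simp only [if_true]
  have hz : ((0 : Nat) : Int) = ((octToDec 0 : Nat) : Int) := by rw [octToDec_zero]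
  calc toHachishinsuLoop ((jn + 1) * (jn + 1) + 1) (jn : Int) (-1 + 1) ((0:Nat) : Int) ((0:Nat) : Int)
      = toHachishinsuLoop ((jn + 1) * (jn + 1) + 1) (jn : Int) ((0:Nat) : Int) ((0:Nat) : Int) ((octToDec 0 : Nat) : Int) := by
        rw [h0, ← hz]
    _ = ((octToDec jn : Nat) : Int) := by
        apply loop_eq
        · omega
        · rw [octToDec_zero]
        · exact octToDec_pos (0 + 1) (by omega)
        · have h1 := octToDec_le_sq jn
          have h2 : jn * jn + 1 ≤ (jn + 1) * (jn + 1) := by nlinarith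
          omega
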